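-- pv_equiv track=rewrite | github.com/Rubiks360/EPR402_Checkers_Playing_Robot | Checkers_Decision_Making_Algorithm/CheckersBoard.py | find_longest_move_list
-- ===== SOURCE A (Python) =====
-- def find_longest_move_list(list_of_moves: list) -> list:
--     max_length = 0
--     max_index = []
--     for i in range(len(list_of_moves)):
--         if len(list_of_moves[i]) == max_length:
--             max_index.append(i)
--         elif len(list_of_moves[i]) > max_length:
--             max_length = len(list_of_moves[i])
--             max_index = [i]
--
--     list_return = []
--     for i in max_index:
--         # check if the list already exists as one of the longest lists
--         if list_of_moves[i] not in list_return:
--             list_return.append(list_of_moves[i])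
--
--     # return a list with no move
--     if len(list_of_moves) == 0:
--         list_return.append([])
--
--     return list_return
-- ===== SOURCE B (Python) =====
-- def find_longest_move_list(list_of_moves: list) -> list:
--     if not list_of_moves:
--         return [[]]
--     max_length = max(len(m) for m in list_of_moves)
--     result = []
--     for m in list_of_moves:
--         if len(m) == max_length and m not in result:
--             result.append(m)
--     return result
-- ===== Notes on version B (the rewrite author's own statement) =====
-- stated objective: simpler
-- what changed: B guards the empty input, computes the maximum length in one dedicated pass, then makes a single filter-and-dedup pass over the moves, replacing A's running-max-with-reset index collection plus a second index-driven dedup loop.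
import Mathlib
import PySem

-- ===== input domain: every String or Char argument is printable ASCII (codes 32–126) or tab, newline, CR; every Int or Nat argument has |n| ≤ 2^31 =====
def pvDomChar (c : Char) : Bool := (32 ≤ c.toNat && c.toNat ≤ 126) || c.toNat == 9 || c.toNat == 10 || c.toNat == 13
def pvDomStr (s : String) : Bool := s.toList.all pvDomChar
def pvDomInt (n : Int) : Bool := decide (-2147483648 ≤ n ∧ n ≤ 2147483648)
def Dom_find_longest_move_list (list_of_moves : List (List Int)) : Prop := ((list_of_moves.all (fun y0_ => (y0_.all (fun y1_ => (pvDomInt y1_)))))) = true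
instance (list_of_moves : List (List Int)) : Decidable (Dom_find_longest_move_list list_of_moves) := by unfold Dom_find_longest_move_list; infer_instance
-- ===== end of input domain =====

-- B is a simpler decomposition: guard the empty input, compute the maximum length in one pass,
-- then filter-and-dedup in a single pass (same cost as A; equivalence is about the return value).

-- ===== PORT A =====
-- enumeration of the list with indices starting at k (models `for i in range(len(list_of_moves))` plus indexing)
def pvEnumFrom (k : Nat) : List (List Int) → List (Nat × List Int)
  | [] => []
  | m :: rest => (k, m) :: pvEnumFrom (k + 1) rest

-- first loop of A: running max length with index collection/reset
def pvLoopA : List (Nat × List Int) → Nat × List Nat → Nat × List Nat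
  | [], s => s
  | (i, m) :: rest, (maxLength, maxIndex) =>
    if m.length = maxLength then
      pvLoopA rest (maxLength, maxIndex ++ [i])
    else if m.length > maxLength then
      pvLoopA rest (m.length, [i])
    else
      pvLoopA rest (maxLength, maxIndex)

def find_longest_move_list (list_of_moves : List (List Int)) : List (List Int) :=
  let s := pvLoopA (pvEnumFrom 0 list_of_moves) (0, [])
  -- second loop: dedup-append list_of_moves[i] for i in max_index
  -- (every collected index is in range by construction, so getD is exact here)
  let list_return := s.2.foldl
    (fun acc i =>
      let m := list_of_moves.getD i []
      if m ∈ acc then acc else acc ++ [m]) []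
  if list_of_moves.length = 0 then list_return ++ [[]] else list_return

-- ===== PORT B =====
def find_longest_move_list_alt (list_of_moves : List (List Int)) : List (List Int) :=
  match list_of_moves with
  | [] => [[]]
  | m :: rest =>
    let maxLength := rest.foldl (fun acc x => max acc x.length) m.length
    list_of_moves.foldl
      (fun acc x => if x.length = maxLength ∧ x ∉ acc then acc ++ [x] else acc) []

-- ===== PRECONDITION & SPEC =====
def Spec_find_longest_move_list (list_of_moves : List (List Int)) (out : List (List Int)) : Prop := out = find_longest_move_list_alt list_of_moves
instance (list_of_moves : List (List Int)) (out : List (List Int)) : Decidable (Spec_find_longest_move_list list_of_moves out) := by unfold Spec_find_longest_move_list; infer_instance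

-- ===== CLAIM (what is proved, stated in full; the proofs are below) =====
def Claim_equal_find_longest_move_list : Prop := ∀ (list_of_moves : List (List Int)), Dom_find_longest_move_list list_of_moves → Spec_find_longest_move_list list_of_moves (find_longest_move_list list_of_moves)

-- ===== LEMMAS AND PROOFS =====

-- the max length over ms starting from seed M
def pvMaxFrom (M : Nat) (ms : List (List Int)) : Nat :=
  ms.foldl (fun acc x => max acc x.length) M

-- the indices (starting at k) of elements of length T
def pvIdxOf (k T : Nat) : List (List Int) → List Nat
  | [] => []
  | m :: rest => (if m.length = T then [k] else []) ++ pvIdxOf (k + 1) T rest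

lemma le_pvMaxFrom (M : Nat) (ms : List (List Int)) : M ≤ pvMaxFrom M ms := by
  induction ms generalizing M with
  | nil => simp [pvMaxFrom]
  | cons m rest ih =>
      calc M ≤ max M m.length := le_max_left _ _
        _ ≤ pvMaxFrom (max M m.length) rest := ih _
        _ = pvMaxFrom M (m :: rest) := rfl

-- characterisation of A's first loop
lemma pvLoopA_spec (ms : List (List Int)) :
    ∀ (k M : Nat) (I : List Nat),
      pvLoopA (pvEnumFrom k ms) (M, I) =
        (pvMaxFrom M ms,
         (if pvMaxFrom M ms = M then I else []) ++ pvIdxOf k (pvMaxFrom M ms) ms) := by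
  induction ms with
  | nil => intro k M I; simp [pvEnumFrom, pvLoopA, pvMaxFrom, pvIdxOf]
  | cons m rest ih =>
      intro k M I
      have hrec : pvMaxFrom M (m :: rest) = pvMaxFrom (max M m.length) rest := rfl
      by_cases h1 : m.length = M
      · have hM : pvMaxFrom M (m :: rest) = pvMaxFrom M rest := by
          rw [hrec, h1, max_self]
        simp only [pvEnumFrom, pvLoopA]
        rw [if_pos h1, ih (k + 1) M (I ++ [k]), hM]
        by_cases h2 : pvMaxFrom M rest = M
        · simp [pvIdxOf, h1, h2]
        · have hne : ¬ m.length = pvMaxFrom M rest := by rw [h1]; exact fun h => h2 h.symm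
          simp [pvIdxOf, h2, hne]
      · by_cases h2 : m.length > M
        · have hM : pvMaxFrom M (m :: rest) = pvMaxFrom m.length rest := by
            rw [hrec, max_eq_right (le_of_lt h2)]
          simp only [pvEnumFrom, pvLoopA]
          rw [if_neg h1, if_pos h2, ih (k + 1) m.length [k], hM]
          have hne : ¬ pvMaxFrom m.length rest = M := by
            have := le_pvMaxFrom m.length rest
            omega
          by_cases h3 : pvMaxFrom m.length rest = m.length
          · simp [pvIdxOf, h3]
            exact fun h => absurd h h1
          · have hne2 : ¬ m.length = pvMaxFrom m.length rest := fun h => h3 h.symm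
            simp [pvIdxOf, h3, hne, hne2]
        · have h3 : m.length < M := by omega
          have hM : pvMaxFrom M (m :: rest) = pvMaxFrom M rest := by
            rw [hrec, max_eq_left (le_of_lt h3)]
          simp only [pvEnumFrom, pvLoopA]
          rw [if_neg h1, if_neg (by omega : ¬ m.length > M), ih (k + 1) M I, hM]
          have hne : ¬ m.length = pvMaxFrom M rest := by
            have := le_pvMaxFrom M rest
            omega
          simp [pvIdxOf, hne]

-- mapping the collected indices through getD recovers the filtered elements
lemma pvIdxOf_map (T : Nat) (ms : List (List Int)) :
    ∀ (pre : List (List Int)),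
      (pvIdxOf pre.length T ms).map (fun i => (pre ++ ms).getD i []) =
        ms.filter (fun m => m.length = T) := by
  induction ms with
  | nil => intro pre; simp [pvIdxOf]
  | cons m rest ih =>
      intro pre
      have hget : (pre ++ m :: rest).getD pre.length [] = m := by
        rw [List.getD_eq_getElem?_getD, List.getElem?_append_right (le_refl _)]
        simp
      have hrest := ih (pre ++ [m])
      have hlen : (pre ++ [m]).length = pre.length + 1 := by simp
      have happ : (pre ++ [m]) ++ rest = pre ++ m :: rest := by simp
      rw [hlen, happ] at hrest
      by_cases h : m.length = T
      · simp only [pvIdxOf, if_pos h, List.singleton_append, List.map_cons, hget, hrest]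
        simp [h]
      · simp only [pvIdxOf, if_neg h, List.nil_append, hrest]
        simp [h]

-- dedup-fold over a filtered list = filter-and-dedup fold over the whole list
lemma fold_filter_dedup (T : Nat) (ms : List (List Int)) :
    ∀ (acc : List (List Int)),
      (ms.filter (fun m => m.length = T)).foldl
          (fun acc m => if m ∈ acc then acc else acc ++ [m]) acc =
        ms.foldl (fun acc x => if x.length = T ∧ x ∉ acc then acc ++ [x] else acc) acc := by
  induction ms with
  | nil => intro acc; rfl
  | cons m rest ih =>
      intro acc
      by_cases h : m.length = T
      · simp only [List.filter_cons, h, decide_true, List.foldl_cons]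
        by_cases hm : m ∈ acc
        · simp [hm, ih]
        · simp [hm, ih]
      · simp only [List.filter_cons, h, decide_false, List.foldl_cons]
        simp [ih]

-- ===== VERDICT (by name: the statement is the Claim_ definition above) =====
theorem find_longest_move_list_spec : Claim_equal_find_longest_move_list := by
  intro ms _
  unfold Spec_find_longest_move_list
  cases ms with
  | nil => decide
  | cons m rest =>
      show find_longest_move_list (m :: rest) = find_longest_move_list_alt (m :: rest)
      unfold find_longest_move_list find_longest_move_list_alt
      simp only [List.length_cons, Nat.succ_ne_zero]
      set T := pvMaxFrom 0 (m :: rest) with hT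
      have hT2 : rest.foldl (fun acc x => max acc x.length) m.length = T := by
        simp [hT, pvMaxFrom]
      rw [pvLoopA_spec (m :: rest) 0 0 []]
      have hmap := pvIdxOf_map T (m :: rest) []
      simp only [List.length_nil, List.nil_append] at hmap
      have hfoldmap :
          ((pvIdxOf 0 T (m :: rest)).map (fun i => (m :: rest).getD i [])).foldl
              (fun acc x => if x ∈ acc then acc else acc ++ [x]) ([] : List (List Int)) =
            (pvIdxOf 0 T (m :: rest)).foldl
              (fun acc i =>
                let x := (m :: rest).getD i []
                if x ∈ acc then acc else acc ++ [x]) ([] : List (List Int)) := by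
        rw [List.foldl_map]
      rw [hT2]
      simp only [← hT]
      rw [← fold_filter_dedup T (m :: rest) [], ← hmap, hfoldmap]
      simp
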